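-- pv_equiv track=rewrite | github.com/dankimjw/PrepSense | backend_gateway/services/crew_ai_service_restored.py | _detect_meal_type
-- ===== SOURCE A (Python) =====
-- def _detect_meal_type(recipe_title: str, user_message: str) -> str:
--     """Detect meal type from recipe title and user message."""
--     title_lower = recipe_title.lower()
--     message_lower = user_message.lower()
--
--     # Check user message first
--     if any(word in message_lower for word in ["breakfast", "morning", "brunch"]):
--         return "breakfast"
--     elif any(word in message_lower for word in ["lunch", "midday", "noon"]):
--         return "lunch"
--     elif any(word in message_lower for word in ["dinner", "supper", "evening"]):
--         return "dinner"
--     elif any(word in message_lower for word in ["snack", "appetizer", "treat"]):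
--         return "snack"
--     elif any(word in message_lower for word in ["dessert", "sweet", "cake", "cookie"]):
--         return "dessert"
--
--     # Then check recipe title
--     if any(
--         word in title_lower
--         for word in ["pancake", "waffle", "omelette", "egg", "breakfast", "cereal", "oatmeal"]
--     ):
--         return "breakfast"
--     elif any(word in title_lower for word in ["sandwich", "salad", "soup", "wrap"]):
--         return "lunch"
--     elif any(
--         word in title_lower
--         for word in ["dessert", "cake", "cookie", "ice cream", "pie", "pudding"]
--     ):
--         return "dessert"
--     elif any(word in title_lower for word in ["snack", "dip", "chips", "popcorn"]):
--         return "snack"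
--
--     return "dinner"  # Default
-- ===== SOURCE B (Python) =====
-- # Exhaustive scoring instead of two short-circuit cascades: a flat keyword table
-- # assigns each keyword a priority rank; collect the ranks of ALL matching keywords
-- # and return the meal type of the minimum rank (default "dinner").
--
-- _MEALS = ["breakfast", "lunch", "dinner", "snack", "dessert",
--           "breakfast", "lunch", "dessert", "snack"]
--
-- # (keyword, source: 0=title/1=message, rank)
-- _TABLE = (
--     [(w, 1, 0) for w in ["breakfast", "morning", "brunch"]]
--     + [(w, 1, 1) for w in ["lunch", "midday", "noon"]]
--     + [(w, 1, 2) for w in ["dinner", "supper", "evening"]]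
--     + [(w, 1, 3) for w in ["snack", "appetizer", "treat"]]
--     + [(w, 1, 4) for w in ["dessert", "sweet", "cake", "cookie"]]
--     + [(w, 0, 5) for w in ["pancake", "waffle", "omelette", "egg", "breakfast", "cereal", "oatmeal"]]
--     + [(w, 0, 6) for w in ["sandwich", "salad", "soup", "wrap"]]
--     + [(w, 0, 7) for w in ["dessert", "cake", "cookie", "ice cream", "pie", "pudding"]]
--     + [(w, 0, 8) for w in ["snack", "dip", "chips", "popcorn"]]
-- )
--
-- def _detect_meal_type(recipe_title: str, user_message: str) -> str:
--     texts = (recipe_title.lower(), user_message.lower())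
--     hits = [rank for kw, src, rank in _TABLE if kw in texts[src]]
--     return _MEALS[min(hits)] if hits else "dinner"
-- ===== Notes on version B (the rewrite author's own statement) =====
-- stated objective: alternative
-- what changed: A's two short-circuit if/elif cascades are replaced by exhaustive scoring: a flat keyword table assigns each keyword a priority rank, B collects the ranks of ALL matching keywords in one comprehension and returns the meal type at the minimum rank (default dinner), so control flow is replaced by data aggregation (filter + min + indexed lookup).
import Mathlib
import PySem

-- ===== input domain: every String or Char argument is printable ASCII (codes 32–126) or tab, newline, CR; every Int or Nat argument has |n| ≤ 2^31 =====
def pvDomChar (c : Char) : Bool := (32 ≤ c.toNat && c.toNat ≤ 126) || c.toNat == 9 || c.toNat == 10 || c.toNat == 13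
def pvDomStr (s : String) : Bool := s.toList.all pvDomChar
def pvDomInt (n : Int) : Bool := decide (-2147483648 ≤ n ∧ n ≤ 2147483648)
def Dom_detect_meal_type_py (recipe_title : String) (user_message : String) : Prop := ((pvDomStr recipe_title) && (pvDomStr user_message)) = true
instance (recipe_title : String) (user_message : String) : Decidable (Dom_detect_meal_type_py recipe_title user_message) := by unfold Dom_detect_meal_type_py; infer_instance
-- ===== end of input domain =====

-- B replaces A's two short-circuit if/elif cascades by exhaustive scoring: a flat
-- keyword table with priority ranks, collect ALL matching ranks, return the meal
-- of the minimum rank (objective: alternative; same return value).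

-- ===== PORT A =====
def detect_meal_type_py (recipe_title : String) (user_message : String) : String :=
  let title_lower := PySem.Str.lower recipe_title
  let message_lower := PySem.Str.lower user_message
  if ["breakfast", "morning", "brunch"].any (fun word => PySem.Str.isIn word message_lower) then
    "breakfast"
  else if ["lunch", "midday", "noon"].any (fun word => PySem.Str.isIn word message_lower) then
    "lunch"
  else if ["dinner", "supper", "evening"].any (fun word => PySem.Str.isIn word message_lower) then
    "dinner"
  else if ["snack", "appetizer", "treat"].any (fun word => PySem.Str.isIn word message_lower) then
    "snack"
  else if ["dessert", "sweet", "cake", "cookie"].any (fun word => PySem.Str.isIn word message_lower) then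
    "dessert"
  else if ["pancake", "waffle", "omelette", "egg", "breakfast", "cereal", "oatmeal"].any (fun word => PySem.Str.isIn word title_lower) then
    "breakfast"
  else if ["sandwich", "salad", "soup", "wrap"].any (fun word => PySem.Str.isIn word title_lower) then
    "lunch"
  else if ["dessert", "cake", "cookie", "ice cream", "pie", "pudding"].any (fun word => PySem.Str.isIn word title_lower) then
    "dessert"
  else if ["snack", "dip", "chips", "popcorn"].any (fun word => PySem.Str.isIn word title_lower) then
    "snack"
  else
    "dinner"

-- ===== PORT B =====
-- _MEALS of Source B
def pvMeals : List String :=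
  ["breakfast", "lunch", "dinner", "snack", "dessert", "breakfast", "lunch", "dessert", "snack"]

-- _TABLE of Source B: (keyword, source: 0=title/1=message, rank), built from the same
-- per-rule keyword lists by the same list-comprehension concatenation
def pvTable : List (String × Int × Int) :=
  (["breakfast", "morning", "brunch"].map (fun w => (w, (1 : Int), (0 : Int))))
  ++ (["lunch", "midday", "noon"].map (fun w => (w, (1 : Int), (1 : Int))))
  ++ (["dinner", "supper", "evening"].map (fun w => (w, (1 : Int), (2 : Int))))
  ++ (["snack", "appetizer", "treat"].map (fun w => (w, (1 : Int), (3 : Int))))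
  ++ (["dessert", "sweet", "cake", "cookie"].map (fun w => (w, (1 : Int), (4 : Int))))
  ++ (["pancake", "waffle", "omelette", "egg", "breakfast", "cereal", "oatmeal"].map (fun w => (w, (0 : Int), (5 : Int))))
  ++ (["sandwich", "salad", "soup", "wrap"].map (fun w => (w, (0 : Int), (6 : Int))))
  ++ (["dessert", "cake", "cookie", "ice cream", "pie", "pudding"].map (fun w => (w, (0 : Int), (7 : Int))))
  ++ (["snack", "dip", "chips", "popcorn"].map (fun w => (w, (0 : Int), (8 : Int))))

def detect_meal_type_py_alt (recipe_title : String) (user_message : String) : String :=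
  let texts : String × String := (PySem.Str.lower recipe_title, PySem.Str.lower user_message)
  let hits : List Int := pvTable.filterMap
    (fun e => if PySem.Str.isIn e.1 (if e.2.1 == 1 then texts.2 else texts.1) then some e.2.2 else none)
  -- _MEALS[min(hits)] if hits else "dinner"; the index is always in range, so getD's default is never used
  match PySem.List.min? hits (fun y => y) with
  | some r => (PySem.List.pyGet? pvMeals r).getD "dinner"
  | none => "dinner"

-- ===== PRECONDITION & SPEC =====
def Spec_detect_meal_type_py (recipe_title : String) (user_message : String) (out : String) : Prop := out = detect_meal_type_py_alt recipe_title user_message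
instance (recipe_title : String) (user_message : String) (out : String) : Decidable (Spec_detect_meal_type_py recipe_title user_message out) := by unfold Spec_detect_meal_type_py; infer_instance

-- ===== CLAIM (what is proved, stated in full; the proofs are below) =====
def Claim_equal_detect_meal_type_py : Prop := ∀ (recipe_title : String) (user_message : String), Dom_detect_meal_type_py recipe_title user_message → Spec_detect_meal_type_py recipe_title user_message (detect_meal_type_py recipe_title user_message)

-- ===== LEMMAS AND PROOFS =====

-- foldl min keeps the start value when it bounds the list
theorem pv_foldl_min_eq (t : List Int) : ∀ (x : Int), (∀ y ∈ t, x ≤ y) → t.foldl min x = x := by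
  induction t with
  | nil => intro x _; rfl
  | cons a t ih =>
      intro x h
      have hxa : x ≤ a := h a (by simp)
      simp only [List.foldl_cons, min_eq_left hxa]
      exact ih x (fun y hy => h y (by simp [hy]))

-- min? of a nondecreasing list is its head
theorem pv_min?_sorted (xs : List Int) (h : xs.Pairwise (· ≤ ·)) :
    PySem.List.min? xs (fun y => y) = xs.head? := by
  cases xs with
  | nil => rfl
  | cons x t =>
      rw [PySem.List.min?_id_cons]
      have := (List.pairwise_cons.mp h).1
      simp [pv_foldl_min_eq t x this]

-- head of a filterMap is the first successful application
theorem pv_head?_filterMap {α β : Type} (g : α → Option β) (l : List α) :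
    (l.filterMap g).head? = l.findSome? g := by
  induction l with
  | nil => rfl
  | cons e t ih =>
      cases hg : g e <;> simp [hg, ih]

-- a filterMap that, when successful, returns the f-image, is a sublist of the map of f
theorem pv_filterMap_sublist {α β : Type} (g : α → Option β) (f : α → β)
    (hg : ∀ e r, g e = some r → r = f e) : ∀ (l : List α), (l.filterMap g).Sublist (l.map f) := by
  intro l
  induction l with
  | nil => simp
  | cons e t ih =>
      cases hge : g e with
      | none => simpa [List.filterMap_cons, hge] using ih.cons (f e)
      | some r =>
          have : r = f e := hg e r hge
          simpa [List.filterMap_cons, hge, this] using ih.cons₂ (f e)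

-- findSome? over one rule's block of keywords = any-match on that rule
theorem pv_findSome_group (T M : String) (ws : List String) (src rank : Int)
    (rest : List (String × Int × Int)) :
    ((ws.map (fun w => (w, src, rank))) ++ rest).findSome?
        (fun e => if PySem.Str.isIn e.1 (if e.2.1 == 1 then M else T) then some e.2.2 else none)
      = if ws.any (fun w => PySem.Str.isIn w (if src == 1 then M else T)) then some rank
        else rest.findSome?
          (fun e => if PySem.Str.isIn e.1 (if e.2.1 == 1 then M else T) then some e.2.2 else none) := by
  induction ws with
  | nil => simp
  | cons w ws ih =>
      simp only [List.map_cons, List.cons_append, List.findSome?_cons, List.any_cons]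
      by_cases hw : PySem.Str.isIn w (if src == 1 then M else T) = true
      · rw [if_pos hw]
        simp at hw
        simp [hw]
      · rw [if_neg hw, ih]
        simp at hw
        simp [hw]

-- ===== VERDICT (by name: the statement is the Claim_ definition above) =====
set_option maxHeartbeats 1000000 in
theorem detect_meal_type_py_spec : Claim_equal_detect_meal_type_py := by
  intro recipe_title user_message _
  show detect_meal_type_py recipe_title user_message = detect_meal_type_py_alt recipe_title user_message
  have hmin : ∀ (T M : String),
      PySem.List.min? (pvTable.filterMap
          (fun e => if PySem.Str.isIn e.1 (if e.2.1 == 1 then M else T) then some e.2.2 else none))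
          (fun y => y)
        = pvTable.findSome?
          (fun e => if PySem.Str.isIn e.1 (if e.2.1 == 1 then M else T) then some e.2.2 else none) := by
    intro T M
    rw [pv_min?_sorted, pv_head?_filterMap]
    exact List.Pairwise.sublist
      (pv_filterMap_sublist _ (fun e => e.2.2) (by intro e r h; split at h <;> simp_all) pvTable)
      (by decide)
  have htab : pvTable
      = (["breakfast", "morning", "brunch"].map (fun w => (w, (1 : Int), (0 : Int))))
        ++ ((["lunch", "midday", "noon"].map (fun w => (w, (1 : Int), (1 : Int))))
        ++ ((["dinner", "supper", "evening"].map (fun w => (w, (1 : Int), (2 : Int))))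
        ++ ((["snack", "appetizer", "treat"].map (fun w => (w, (1 : Int), (3 : Int))))
        ++ ((["dessert", "sweet", "cake", "cookie"].map (fun w => (w, (1 : Int), (4 : Int))))
        ++ ((["pancake", "waffle", "omelette", "egg", "breakfast", "cereal", "oatmeal"].map (fun w => (w, (0 : Int), (5 : Int))))
        ++ ((["sandwich", "salad", "soup", "wrap"].map (fun w => (w, (0 : Int), (6 : Int))))
        ++ ((["dessert", "cake", "cookie", "ice cream", "pie", "pudding"].map (fun w => (w, (0 : Int), (7 : Int))))
        ++ ((["snack", "dip", "chips", "popcorn"].map (fun w => (w, (0 : Int), (8 : Int))))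
        ++ ([] : List (String × Int × Int)))))))))) := by
    simp [pvTable]
  simp only [detect_meal_type_py_alt]
  rw [hmin, htab]
  simp only [pv_findSome_group]
  have h1 : (((1 : Int) == 1) = true) := rfl
  have h0 : (((0 : Int) == 1) = false) := rfl
  simp only [h1, h0, Bool.false_eq_true, if_true, if_false, List.findSome?_nil]
  simp only [detect_meal_type_py]
  split_ifs <;> rfl
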